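-- pv_equiv track=rewrite | github.com/BENMEZIAN/suffix-array-in-python | Projet TP/programme/suffix_array.py | find_supermaximal_repeats
-- ===== SOURCE A (Python) =====
-- def find_supermaximal_repeats(s, sa, lcp):
--     n = len(s)
--     max_lcp = max(lcp)
--     supermaximal_repeats = []
--
--     for i in range(n):
--         if lcp[i] >= max_lcp:
--             lcp_length = lcp[i]
--             j = i + 1
--
--             while j < n and lcp[j] >= lcp_length:
--                 j += 1
--
--             for k in range(i, j):
--                 if sa[k] + lcp_length < n and lcp[k] >= max_lcp:
--                     candidate_repeat = s[sa[k]:sa[k]+lcp_length]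
--                     if candidate_repeat not in supermaximal_repeats:
--                         supermaximal_repeats.append(candidate_repeat)
--
--     return supermaximal_repeats
-- ===== SOURCE B (Python) =====
-- def find_supermaximal_repeats(s, sa, lcp):
--     # Single pass: every qualifying index has lcp[k] == max(lcp), and A's
--     # first-seen order equals ascending k, so one dedup pass suffices.
--     n = len(s)
--     max_lcp = max(lcp)
--     seen = set()
--     result = []
--     for k in range(n):
--         if lcp[k] == max_lcp and sa[k] + max_lcp < n:
--             candidate = s[sa[k]:sa[k]+max_lcp]
--             if candidate not in seen:
--                 seen.add(candidate)
--                 result.append(candidate)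
--     return result
-- ===== Notes on version B (the rewrite author's own statement) =====
-- stated objective: faster
-- what changed: Replaces A's run-detection outer loop with inner while-scan and nested dedup-by-list-membership scan by a single pass over k that keeps indices with lcp[k] == max(lcp) and deduplicates with a seen-set, relying on the proved fact that A's first-seen order equals ascending k order.
import Mathlib
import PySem

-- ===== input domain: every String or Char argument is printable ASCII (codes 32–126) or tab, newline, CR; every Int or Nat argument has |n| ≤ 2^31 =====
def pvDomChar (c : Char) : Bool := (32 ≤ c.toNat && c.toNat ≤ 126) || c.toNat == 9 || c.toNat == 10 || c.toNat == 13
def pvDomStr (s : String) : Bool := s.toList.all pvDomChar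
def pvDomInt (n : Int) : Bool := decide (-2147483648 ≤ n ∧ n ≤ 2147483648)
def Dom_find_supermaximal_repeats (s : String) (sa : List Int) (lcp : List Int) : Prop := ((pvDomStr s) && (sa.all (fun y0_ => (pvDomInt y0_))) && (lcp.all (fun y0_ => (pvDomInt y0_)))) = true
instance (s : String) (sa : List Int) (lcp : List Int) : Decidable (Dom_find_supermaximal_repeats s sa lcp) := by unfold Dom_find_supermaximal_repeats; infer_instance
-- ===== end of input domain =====

-- B replaces A's run-detection outer loop + inner while + inner scan by one
-- seen-set dedup pass over k (measured faster; same first-seen order, proved below).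

-- ===== PORT A =====
-- the 'while j < n and lcp[j] >= lcp_length: j += 1' loop
def pvWhileA (lcp : List Int) (n : Nat) (ll : Int) (j : Nat) : Nat :=
  if _h : j < n then
    if ll ≤ PySem.List.pyGetD lcp (j : Int) 0 then pvWhileA lcp n ll (j + 1) else j
  else j
termination_by n - j

-- body of 'for k in range(i, j)'
def pvStepA (s : String) (sa lcp : List Int) (n : Nat) (m ll : Int)
    (acc : List String) (k : Nat) : List String :=
  if PySem.List.pyGetD sa (k : Int) 0 + ll < (n : Int) ∧ m ≤ PySem.List.pyGetD lcp (k : Int) 0 then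
    let cand := PySem.Str.slice s (some (PySem.List.pyGetD sa (k : Int) 0))
        (some (PySem.List.pyGetD sa (k : Int) 0 + ll))
    if cand ∈ acc then acc else acc ++ [cand]
  else acc

-- body of 'for i in range(n)'
def pvOuterA (s : String) (sa lcp : List Int) (n : Nat) (m : Int)
    (acc : List String) (i : Nat) : List String :=
  if m ≤ PySem.List.pyGetD lcp (i : Int) 0 then           -- if lcp[i] >= max_lcp
    let ll := PySem.List.pyGetD lcp (i : Int) 0
    let j := pvWhileA lcp n ll (i + 1)                    -- the while loop
    (List.range' i (j - i)).foldl (pvStepA s sa lcp n m ll) acc   -- for k in range(i, j)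
  else acc

def find_supermaximal_repeats (s : String) (sa : List Int) (lcp : List Int) : List String :=
  let n := s.toList.length                                -- n = len(s)
  let m := (PySem.List.max? lcp (fun x => x)).getD 0      -- max_lcp = max(lcp); Pre_ gives lcp ≠ []
  (List.range n).foldl (pvOuterA s sa lcp n m) []         -- for i in range(n)

-- ===== PORT B =====
-- body of B's single 'for k in range(n)', state (seen, result)
def pvStepB (s : String) (sa lcp : List Int) (n : Nat) (m : Int)
    (st : PySem.Set String × List String) (k : Nat) : PySem.Set String × List String :=
  if PySem.List.pyGetD lcp (k : Int) 0 = m ∧ PySem.List.pyGetD sa (k : Int) 0 + m < (n : Int) then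
    let cand := PySem.Str.slice s (some (PySem.List.pyGetD sa (k : Int) 0))
        (some (PySem.List.pyGetD sa (k : Int) 0 + m))
    if cand ∈ st.1 then st else (PySem.Set.add st.1 cand, st.2 ++ [cand])
  else st

def find_supermaximal_repeats_alt (s : String) (sa : List Int) (lcp : List Int) : List String :=
  let n := s.toList.length
  let m := (PySem.List.max? lcp (fun x => x)).getD 0
  ((List.range n).foldl (pvStepB s sa lcp n m) (PySem.Set.empty, [])).2

-- ===== PRECONDITION & SPEC =====
-- Pre_ excludes exactly where Python A raises: max([]) is a ValueError, lcp[i]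
-- is an IndexError when len(lcp) < len(s), and sa[k] is an IndexError when some
-- k < len(s) with lcp[k] = max(lcp) lies beyond len(sa).
def Pre_find_supermaximal_repeats (s : String) (sa : List Int) (lcp : List Int) : Prop :=
  lcp ≠ [] ∧ s.toList.length ≤ lcp.length ∧
  ∀ k : Nat, k < s.toList.length →
    some (lcp.getD k 0) = PySem.List.max? lcp (fun x => x) → k < sa.length

instance (s : String) (sa : List Int) (lcp : List Int) : Decidable (Pre_find_supermaximal_repeats s sa lcp) := by
  unfold Pre_find_supermaximal_repeats; infer_instance

def pvWitness_find_supermaximal_repeats : String × List Int × List Int :=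
  ("aba", [2, 0, 1], [0, 1, 0])

def Spec_find_supermaximal_repeats (s : String) (sa : List Int) (lcp : List Int) (out : List String) : Prop := out = find_supermaximal_repeats_alt s sa lcp
instance (s : String) (sa : List Int) (lcp : List Int) (out : List String) : Decidable (Spec_find_supermaximal_repeats s sa lcp out) := by unfold Spec_find_supermaximal_repeats; infer_instance

-- ===== CLAIM (what is proved, stated in full; the proofs are below) =====
def Claim_equal_find_supermaximal_repeats : Prop := ∀ (s : String) (sa : List Int) (lcp : List Int), Dom_find_supermaximal_repeats s sa lcp → Pre_find_supermaximal_repeats s sa lcp → Spec_find_supermaximal_repeats s sa lcp (find_supermaximal_repeats s sa lcp)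

-- ===== LEMMAS AND PROOFS =====

-- the candidate substring at index k
def pvCand (s : String) (sa : List Int) (m : Int) (k : Nat) : String :=
  PySem.Str.slice s (some (PySem.List.pyGetD sa (k : Int) 0))
    (some (PySem.List.pyGetD sa (k : Int) 0 + m))

-- dedup-append step (B without the seen-set), the common reference point
def pvStepD (s : String) (sa lcp : List Int) (n : Nat) (m : Int)
    (acc : List String) (k : Nat) : List String :=
  if PySem.List.pyGetD lcp (k : Int) 0 = m ∧ PySem.List.pyGetD sa (k : Int) 0 + m < (n : Int) then
    if pvCand s sa m k ∈ acc then acc else acc ++ [pvCand s sa m k]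
  else acc

def pvColl (s : String) (sa lcp : List Int) (n : Nat) (m : Int) (t : Nat) : List String :=
  (List.range t).foldl (pvStepD s sa lcp n m) []

-- lcp[k] ≥ max(lcp) is lcp[k] = max(lcp) for in-range k
lemma pvMaxIff {lcp : List Int} {m : Int} {n k : Nat}
    (hm : PySem.List.max? lcp (fun x => x) = some m) (hlen : n ≤ lcp.length) (hk : k < n) :
    (m ≤ PySem.List.pyGetD lcp (k : Int) 0 ↔ PySem.List.pyGetD lcp (k : Int) 0 = m) := by
  have hkl : k < lcp.length := lt_of_lt_of_le hk hlen
  have hget : PySem.List.pyGetD lcp (k : Int) 0 = lcp[k] := by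
    simp [PySem.List.pyGetD_natCast, List.getD_eq_getElem?_getD, hkl]
  have hle : lcp[k] ≤ m := PySem.List.max?_isMax hm lcp[k] (by simp)
  rw [hget]
  omega

-- unfolding facts about the while loop
lemma pvWhileA_stop {lcp : List Int} {n : Nat} {ll : Int} {j : Nat} (h : ¬ j < n) :
    pvWhileA lcp n ll j = j := by
  rw [pvWhileA, dif_neg h]

lemma pvWhileA_stay {lcp : List Int} {n : Nat} {ll : Int} {j : Nat} (h : j < n)
    (h2 : ¬ ll ≤ PySem.List.pyGetD lcp (j : Int) 0) :
    pvWhileA lcp n ll j = j := by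
  rw [pvWhileA, dif_pos h, if_neg h2]

lemma pvWhileA_step {lcp : List Int} {n : Nat} {ll : Int} {j : Nat} (h : j < n)
    (h2 : ll ≤ PySem.List.pyGetD lcp (j : Int) 0) :
    pvWhileA lcp n ll j = pvWhileA lcp n ll (j + 1) := by
  rw [pvWhileA, dif_pos h, if_pos h2]

lemma pvWhileA_spec (lcp : List Int) (n : Nat) (ll : Int) :
    ∀ j, j ≤ n → j ≤ pvWhileA lcp n ll j ∧ pvWhileA lcp n ll j ≤ n := by
  intro j
  induction j using pvWhileA.induct lcp n ll with
  | case1 j h h2 ih =>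
    intro _
    have := ih (by omega)
    rw [pvWhileA_step h h2]
    omega
  | case2 j h h2 =>
    intro _
    rw [pvWhileA_stay h h2]
    omega
  | case3 j h =>
    intro hj
    rw [pvWhileA_stop h]
    omega

-- A's inner step with ll = m equals the dedup step, for in-range k
lemma pvStepA_eq_stepD {s : String} {sa lcp : List Int} {n : Nat} {m : Int} {k : Nat}
    (hm : PySem.List.max? lcp (fun x => x) = some m) (hlen : n ≤ lcp.length) (hk : k < n)
    (acc : List String) :
    pvStepA s sa lcp n m m acc k = pvStepD s sa lcp n m acc k := by
  have hiff := pvMaxIff hm hlen hk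
  unfold pvStepA pvStepD pvCand
  by_cases hg : PySem.List.pyGetD lcp (k : Int) 0 = m
  · simp only [hg, le_refl, and_true, true_and]
  · have h2 : ¬ m ≤ PySem.List.pyGetD lcp (k : Int) 0 := fun h => hg (hiff.mp h)
    rw [if_neg (fun hc => h2 hc.2), if_neg (fun hc => hg hc.1)]

-- B's fold with the (seen, result) pair projects to the dedup fold
lemma pvStepB_fold (s : String) (sa lcp : List Int) (n : Nat) (m : Int) :
    ∀ (ks : List Nat) (st : PySem.Set String × List String),
      (∀ x, x ∈ st.1 ↔ x ∈ st.2) →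
      (ks.foldl (pvStepB s sa lcp n m) st).2 = ks.foldl (pvStepD s sa lcp n m) st.2 ∧
      (∀ x, x ∈ (ks.foldl (pvStepB s sa lcp n m) st).1 ↔
            x ∈ (ks.foldl (pvStepB s sa lcp n m) st).2) := by
  intro ks
  induction ks with
  | nil => intro st h; exact ⟨rfl, h⟩
  | cons k ks ih =>
    intro st h
    simp only [List.foldl_cons]
    have hsnd : (pvStepB s sa lcp n m st k).2 = pvStepD s sa lcp n m st.2 k := by
      unfold pvStepB pvStepD pvCand
      dsimp only
      split_ifs with hg h1 h2 h2
      · rfl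
      · exact absurd ((h _).mp h1) h2
      · exact absurd ((h _).mpr h2) h1
      · rfl
      · rfl
    have hmem : ∀ x, x ∈ (pvStepB s sa lcp n m st k).1 ↔ x ∈ (pvStepB s sa lcp n m st k).2 := by
      intro x
      unfold pvStepB
      dsimp only
      split_ifs with hg h1
      · exact h x
      · simp [PySem.Set.mem_add, h x]
      · exact h x
    rw [← hsnd]
    exact ih _ hmem

-- one dedup step only adds elements
lemma pvStepD_mono {s : String} {sa lcp : List Int} {n : Nat} {m : Int}
    {acc : List String} {k : Nat} {x : String} (hx : x ∈ acc) :
    x ∈ pvStepD s sa lcp n m acc k := by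
  unfold pvStepD
  split_ifs <;> simp [hx]

-- candidates of processed good indices are present
lemma pvCand_mem_coll {s : String} {sa lcp : List Int} {n : Nat} {m : Int} {k t : Nat}
    (hk : k < t)
    (hg : PySem.List.pyGetD lcp (k : Int) 0 = m ∧ PySem.List.pyGetD sa (k : Int) 0 + m < (n : Int)) :
    pvCand s sa m k ∈ pvColl s sa lcp n m t := by
  induction t with
  | zero => omega
  | succ t ih =>
    have hstep : pvColl s sa lcp n m (t + 1) =
        pvStepD s sa lcp n m (pvColl s sa lcp n m t) t := by
      unfold pvColl
      rw [List.range_succ, List.foldl_append, List.foldl_cons, List.foldl_nil]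
    rcases Nat.lt_or_ge k t with hlt | hge
    · rw [hstep]; exact pvStepD_mono (ih hlt)
    · have : k = t := by omega
      subst this
      rw [hstep]
      unfold pvStepD
      rw [if_pos hg]
      split_ifs with hmem
      · exact hmem
      · simp

-- a dedup step at an already-processed index is a no-op
lemma pvStepD_absorb {s : String} {sa lcp : List Int} {n : Nat} {m : Int} {k t : Nat}
    (hk : k < t) :
    pvStepD s sa lcp n m (pvColl s sa lcp n m t) k = pvColl s sa lcp n m t := by
  unfold pvStepD
  split_ifs with hg hmem
  · rfl
  · exact absurd (pvCand_mem_coll hk hg) hmem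
  · rfl

lemma pvFoldD_absorb (s : String) (sa lcp : List Int) (n : Nat) (m : Int) (t : Nat) :
    ∀ (ks : List Nat), (∀ k ∈ ks, k < t) →
      ks.foldl (pvStepD s sa lcp n m) (pvColl s sa lcp n m t) = pvColl s sa lcp n m t := by
  intro ks
  induction ks with
  | nil => intro _; rfl
  | cons k ks ih =>
    intro h
    simp only [List.foldl_cons]
    rw [pvStepD_absorb (h k (by simp))]
    exact ih (fun k hk => h k (by simp [hk]))

-- extending the processed prefix from i to t
lemma pvColl_extend (s : String) (sa lcp : List Int) (n : Nat) (m : Int) {i t : Nat}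
    (hit : i ≤ t) :
    (List.range' i (t - i)).foldl (pvStepD s sa lcp n m) (pvColl s sa lcp n m i) =
      pvColl s sa lcp n m t := by
  unfold pvColl
  rw [← List.foldl_append]
  congr 1
  rw [List.range_eq_range', List.range_eq_range']
  have h : List.range' 0 i 1 ++ List.range' (0 + 1 * i) (t - i) 1 =
      List.range' 0 (i + (t - i)) 1 := List.range'_append
  simpa [Nat.add_sub_cancel' hit] using h

-- the end of the processed region after outer iteration i - 1
def pvEnd (lcp : List Int) (n : Nat) (m : Int) (i : Nat) : Nat :=
  if 0 < i ∧ PySem.List.pyGetD lcp ((i - 1 : Nat) : Int) 0 = m then pvWhileA lcp n m i else i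

lemma pvEnd_n (lcp : List Int) (n : Nat) (m : Int) : pvEnd lcp n m n = n := by
  unfold pvEnd
  split_ifs with h
  · exact pvWhileA_stop (by omega)
  · rfl

-- outer-loop invariant
lemma pvOuter_invariant {s : String} {sa lcp : List Int} {n : Nat} {m : Int}
    (hm : PySem.List.max? lcp (fun x => x) = some m) (hlen : n ≤ lcp.length) :
    ∀ i, i ≤ n →
      (List.range i).foldl (pvOuterA s sa lcp n m) [] =
        pvColl s sa lcp n m (pvEnd lcp n m i) := by
  intro i
  induction i with
  | zero => intro _; rfl
  | succ i ih =>
    intro hi1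
    have hi : i < n := by omega
    rw [List.range_succ, List.foldl_append, List.foldl_cons, List.foldl_nil, ih (by omega)]
    by_cases hgi : m ≤ PySem.List.pyGetD lcp (i : Int) 0
    · -- lcp[i] == max: process the run [i, j*)
      have hgieq : PySem.List.pyGetD lcp (i : Int) 0 = m := (pvMaxIff hm hlen hi).mp hgi
      set j := pvWhileA lcp n m (i + 1) with hj
      have hjspec := pvWhileA_spec lcp n m (i + 1) (by omega)
      have houter : pvOuterA s sa lcp n m (pvColl s sa lcp n m (pvEnd lcp n m i)) i =
          (List.range' i (j - i)).foldl (pvStepA s sa lcp n m m)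
            (pvColl s sa lcp n m (pvEnd lcp n m i)) := by
        unfold pvOuterA
        rw [if_pos hgi, hgieq]
      rw [houter]
      have hconv : ∀ acc, (List.range' i (j - i)).foldl (pvStepA s sa lcp n m m) acc =
          (List.range' i (j - i)).foldl (pvStepD s sa lcp n m) acc := by
        intro acc
        apply PySem.List.foldl_congr_mem
        intro acc' k hk
        have hkr := List.mem_range'.mp hk
        exact pvStepA_eq_stepD hm hlen (by omega) acc'
      rw [hconv]
      have hEndSucc : pvEnd lcp n m (i + 1) = j := by
        unfold pvEnd
        rw [if_pos ⟨by omega, by simpa using hgieq⟩]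
      rw [hEndSucc]
      by_cases hprev : 0 < i ∧ PySem.List.pyGetD lcp ((i - 1 : Nat) : Int) 0 = m
      · -- inside a run already fully processed: everything is absorbed
        have hEndi : pvEnd lcp n m i = j := by
          unfold pvEnd
          rw [if_pos hprev, pvWhileA_step hi hgi]
        rw [hEndi]
        apply pvFoldD_absorb
        intro k hk
        have hkr := List.mem_range'.mp hk
        omega
      · -- fresh run start: extend the collection from i to j
        have hEndi : pvEnd lcp n m i = i := by
          unfold pvEnd
          rw [if_neg hprev]
        rw [hEndi]
        exact pvColl_extend s sa lcp n m (by omega)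
    · -- lcp[i] < max: the outer body does nothing and index i contributes nothing
      have hgne : PySem.List.pyGetD lcp (i : Int) 0 ≠ m := by
        intro h; exact hgi (h ▸ le_refl m)
      have houter : ∀ acc, pvOuterA s sa lcp n m acc i = acc := by
        intro acc; unfold pvOuterA; rw [if_neg hgi]
      have hEndi : pvEnd lcp n m i = i := by
        unfold pvEnd
        split_ifs with h
        · exact pvWhileA_stay hi hgi
        · rfl
      have hEndSucc : pvEnd lcp n m (i + 1) = i + 1 := by
        unfold pvEnd
        split_ifs with h
        · exact absurd (by simpa using h.2) hgne
        · rfl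
      rw [houter, hEndi, hEndSucc]
      unfold pvColl
      rw [List.range_succ, List.foldl_append, List.foldl_cons, List.foldl_nil]
      unfold pvStepD
      rw [if_neg (fun h => hgne h.1)]

-- ===== VERDICT (by name: the statement is the Claim_ definition above) =====
theorem find_supermaximal_repeats_spec : Claim_equal_find_supermaximal_repeats := by
  intro s sa lcp _hdom hpre
  obtain ⟨hne, hlen, _hsa⟩ := hpre
  unfold Spec_find_supermaximal_repeats
  obtain ⟨m, hm⟩ : ∃ m, PySem.List.max? lcp (fun x => x) = some m := by
    cases hmx : PySem.List.max? lcp (fun x => x) with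
    | none => exact absurd ((PySem.List.max?_eq_none_iff lcp (fun x => x)).mp hmx) hne
    | some m => exact ⟨m, rfl⟩
  unfold find_supermaximal_repeats find_supermaximal_repeats_alt
  rw [hm]
  have hA := pvOuter_invariant (s := s) (sa := sa) hm hlen s.toList.length le_rfl
  rw [pvEnd_n] at hA
  have hB := pvStepB_fold s sa lcp s.toList.length m (List.range s.toList.length)
    (PySem.Set.empty, []) (by intro x; simp [PySem.Set.empty])
  simp only [Option.getD_some]
  rw [hA, hB.1]
  rfl
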